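-- pv_equiv track=rewrite | github.com/lpsz-star/fund_research_v2 | src/fund_research_v2/evaluation/robustness.py | _factor_slice_definitions
-- ===== SOURCE A (Python) =====
-- from collections import defaultdict
--
-- def _factor_slice_definitions(months: list[str]) -> list[tuple[str, str, list[str]]]:
--     """构建因子阶段稳定性切片定义。"""
--     definitions: list[tuple[str, str, list[str]]] = []
--     by_year: dict[str, list[str]] = defaultdict(list)
--     for month in months:
--         by_year[month[:4]].append(month)
--     for year in sorted(by_year):
--         definitions.append(("calendar_year", year, by_year[year]))
--     for start in range(0, len(months), 6):
--         segment = months[start : start + 6]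
--         if segment:
--             definitions.append(("half_year", f"{segment[0]}~{segment[-1]}", segment))
--     return definitions
-- ===== SOURCE B (Python) =====
-- def _factor_slice_definitions(months: list[str]) -> list[tuple[str, str, list[str]]]:
--     """Calendar-year and half-year slice definitions (sorted distinct years + filters; recursive-style chunking)."""
--     years = sorted({m[:4] for m in months})
--     defs = [("calendar_year", y, [m for m in months if m[:4] == y]) for y in years]
--     rest = months
--     while rest:
--         seg, rest = rest[:6], rest[6:]
--         defs.append(("half_year", seg[0] + "~" + seg[-1], seg))
--     return defs
-- ===== Notes on version B (the rewrite author's own statement) =====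
-- stated objective: simpler
-- what changed: B drops A's defaultdict bucketing and sorted(dict-keys) pass in favour of sorting the distinct year prefixes and filtering the months per year, and replaces the index-range half-year loop with structural take/drop chunking of the list.
import Mathlib
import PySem

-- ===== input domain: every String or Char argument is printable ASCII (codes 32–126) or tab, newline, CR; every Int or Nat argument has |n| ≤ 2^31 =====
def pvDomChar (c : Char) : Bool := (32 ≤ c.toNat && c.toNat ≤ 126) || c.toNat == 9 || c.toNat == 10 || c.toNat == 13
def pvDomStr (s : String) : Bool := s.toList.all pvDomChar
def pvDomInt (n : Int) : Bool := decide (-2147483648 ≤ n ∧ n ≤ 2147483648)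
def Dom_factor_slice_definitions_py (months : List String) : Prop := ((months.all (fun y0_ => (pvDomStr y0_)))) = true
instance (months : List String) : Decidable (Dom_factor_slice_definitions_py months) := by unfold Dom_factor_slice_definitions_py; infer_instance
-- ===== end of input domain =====

-- B replaces A's defaultdict bucketing + sorted(dict) with sorted distinct year keys and per-year
-- filters, and replaces the index-range chunk loop with structural take/drop chunking (objective: simpler).

-- month[:4]
def pvKey4 (m : String) : String := PySem.Str.slice m none (some 4)

-- ===== PORT A =====
def factor_slice_definitions_py (months : List String) : List (String × String × List String) :=
  let by_year : PySem.Dict String (List String) :=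
    months.foldl (fun d month => d.modify (pvKey4 month) [] (fun cur => cur ++ [month]))
      PySem.Dict.empty
  let defs1 :=
    (PySem.List.sorted by_year.keys (fun y => y) false).foldl
      (fun acc year => acc ++ [("calendar_year", year, by_year.getD year [])]) []
  (PySem.List.pyRange 0 (months.length : Int) 6).foldl
    (fun acc start =>
      let segment := PySem.List.slice months (some start) (some (start + 6))
      if segment ≠ [] then
        -- segment[0] / segment[-1]: inside the nonempty guard, pyGetD with any default is exact
        acc ++ [("half_year",
                 PySem.List.pyGetD segment 0 "" ++ "~" ++ PySem.List.pyGetD segment (-1) "",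
                 segment)]
      else acc)
    defs1

-- ===== PORT B =====
-- the while-loop over `rest`: seg = rest[:6], rest = rest[6:]  (note (m :: rest').drop 6 = rest'.drop 5)
def pvHalves : List String → List (String × String × List String)
  | [] => []
  | m :: rest =>
    let seg := (m :: rest).take 6
    ("half_year",
     PySem.List.pyGetD seg 0 "" ++ "~" ++ PySem.List.pyGetD seg (-1) "",
     seg) :: pvHalves (rest.drop 5)
termination_by l => l.length
decreasing_by simp [List.length_drop]

def factor_slice_definitions_py_alt (months : List String) : List (String × String × List String) :=
  let years := PySem.List.sorted (PySem.Set.ofList (months.map pvKey4)) (fun y => y) false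
  let defs := years.map (fun y => ("calendar_year", y, months.filter (fun m => pvKey4 m == y)))
  defs ++ pvHalves months

-- ===== PRECONDITION & SPEC =====
def Spec_factor_slice_definitions_py (months : List String) (out : List (String × String × List String)) : Prop := out = factor_slice_definitions_py_alt months
instance (months : List String) (out : List (String × String × List String)) : Decidable (Spec_factor_slice_definitions_py months out) := by unfold Spec_factor_slice_definitions_py; infer_instance

-- ===== CLAIM (what is proved, stated in full; the proofs are below) =====
def Claim_equal_factor_slice_definitions_py : Prop := ∀ (months : List String), Dom_factor_slice_definitions_py months → Spec_factor_slice_definitions_py months (factor_slice_definitions_py months)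

-- ===== LEMMAS AND PROOFS =====

-- The dict built by A holds, at key y, exactly the months whose 4-char prefix is y.
lemma pv_byYear_getD (months : List String) (y : String) :
    (months.foldl (fun d month => d.modify (pvKey4 month) [] (fun cur => cur ++ [month]))
      (PySem.Dict.empty : PySem.Dict String (List String))).getD y []
      = months.filter (fun m => pvKey4 m == y) := by
  have h : months.foldl (fun d month => d.modify (pvKey4 month) [] (fun cur => cur ++ [month]))
      (PySem.Dict.empty : PySem.Dict String (List String))
      = (months.map (fun m => (pvKey4 m, m))).foldl
          (fun d p => d.modify p.1 [] (fun cur => cur ++ [p.2])) PySem.Dict.empty := by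
    rw [List.foldl_map]
  rw [h, PySem.Dict.getD_foldl_modify_append]
  simp [List.filter_map, Function.comp_def]

lemma pv_byYear_keys (months : List String) :
    (months.foldl (fun d month => d.modify (pvKey4 month) [] (fun cur => cur ++ [month]))
      (PySem.Dict.empty : PySem.Dict String (List String))).keys
      = PySem.Set.ofList (months.map pvKey4) := by
  rw [PySem.Dict.keys_foldl_modify_key months pvKey4 [] (fun _ x cur => cur ++ [x])]
  simp [PySem.Set.update_nil_left]

-- range(0, N, 6) as a mapped Nat range with the ceiling chunk count
lemma pv_pyRange6 (N : Nat) :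
    PySem.List.pyRange 0 (N : Int) 6 = (List.range ((N + 5) / 6)).map (fun k => ((6 * k : Nat) : Int)) := by
  rw [PySem.List.pyRange_of_pos 0 (N : Int) (by norm_num)]
  have hc : (if (0 : Int) < (N : Int) then (((N : Int) - 0 + 6 - 1) / 6).toNat else 0) = (N + 5) / 6 := by
    split_ifs with h <;> omega
  rw [hc]
  refine List.map_congr_left ?_
  intro k _
  push_cast
  ring

-- A's half-year fold equals B's structural chunking.
lemma pv_half_fold (months : List String) (acc : List (String × String × List String)) :
    (PySem.List.pyRange 0 (months.length : Int) 6).foldl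
      (fun acc start =>
        let segment := PySem.List.slice months (some start) (some (start + 6))
        if segment ≠ [] then
          acc ++ [("half_year",
                   PySem.List.pyGetD segment 0 "" ++ "~" ++ PySem.List.pyGetD segment (-1) "",
                   segment)]
        else acc) acc
    = acc ++ pvHalves months := by
  induction months using pvHalves.induct generalizing acc with
  | case1 =>
    have h : PySem.List.pyRange 0 ((0:Nat) : Int) 6 = [] := by rw [pv_pyRange6]; simp
    simpa [pvHalves] using congrArg (fun l => l.foldl (fun acc (start : Int) =>
        let segment := PySem.List.slice ([] : List String) (some start) (some (start + 6))
        if segment ≠ [] then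
          acc ++ [("half_year",
                   PySem.List.pyGetD segment 0 "" ++ "~" ++ PySem.List.pyGetD segment (-1) "",
                   segment)]
        else acc) acc) h
  | case2 m rest ih =>
    rw [pv_pyRange6]
    have hk : ((m :: rest).length + 5) / 6 = ((rest.drop 5).length + 5) / 6 + 1 := by
      simp; omega
    rw [hk, List.range_succ_eq_map, List.map_cons, List.foldl_cons]
    -- first chunk: start = 0, segment = months[0:6] = (m :: rest).take 6, nonempty
    have h0 : PySem.List.slice (m :: rest) (some ((6 * 0 : Nat) : Int)) (some (((6 * 0 : Nat) : Int) + 6))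
        = (m :: rest).take 6 := by
      rw [PySem.List.slice_toNat _ (by positivity) (by positivity)]
      norm_num
      rfl
    rw [List.map_map, List.foldl_map]
    simp only [h0]
    have hne : ((m :: rest).take 6 ≠ []) := by simp
    simp only [if_pos hne]
    -- remaining chunks: shift by 6 = work on (m :: rest).drop 6 = rest.drop 5
    have hbody : (fun (acc : List (String × String × List String)) (k : Nat) =>
        (fun acc start =>
          let segment := PySem.List.slice (m :: rest) (some start) (some (start + 6))
          if segment ≠ [] then
            acc ++ [("half_year",
                     PySem.List.pyGetD segment 0 "" ++ "~" ++ PySem.List.pyGetD segment (-1) "",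
                     segment)]
          else acc) acc (((fun k => ((6 * k : Nat) : Int)) ∘ Nat.succ) k))
        = (fun (acc : List (String × String × List String)) (k : Nat) =>
        (fun acc start =>
          let segment := PySem.List.slice (rest.drop 5) (some start) (some (start + 6))
          if segment ≠ [] then
            acc ++ [("half_year",
                     PySem.List.pyGetD segment 0 "" ++ "~" ++ PySem.List.pyGetD segment (-1) "",
                     segment)]
          else acc) acc (((6 * k : Nat) : Int))) := by
      funext acc k
      have hseg : PySem.List.slice (m :: rest) (some ((6 * (k + 1) : Nat) : Int)) (some (((6 * (k + 1) : Nat) : Int) + 6))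
          = PySem.List.slice (rest.drop 5) (some ((6 * k : Nat) : Int)) (some (((6 * k : Nat) : Int) + 6)) := by
        rw [PySem.List.slice_toNat _ (by positivity) (by positivity),
            PySem.List.slice_toNat _ (by positivity) (by positivity)]
        have h1 : ((6 * (k + 1) : Nat) : Int).toNat = 6 * k + 6 := by omega
        have h2 : (((6 * (k + 1) : Nat) : Int) + 6).toNat = 6 * k + 12 := by omega
        have h3 : ((6 * k : Nat) : Int).toNat = 6 * k := by omega
        have h4 : (((6 * k : Nat) : Int) + 6).toNat = 6 * k + 6 := by omega
        rw [h1, h2, h3, h4, List.drop_drop]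
        have h5 : (6 * k + 6 : Nat) = (6 * k + 5) + 1 := by omega
        rw [h5, List.drop_succ_cons,
            show 6 * k + 12 - (6 * k + 5 + 1) = 6 from by omega,
            show 6 * k + 5 + 1 - 6 * k = 6 from by omega,
            show 5 + 6 * k = 6 * k + 5 from by omega]
      simp only [Function.comp, Nat.succ_eq_add_one, hseg]
    rw [hbody]
    have := ih (acc ++ [("half_year",
        PySem.List.pyGetD ((m :: rest).take 6) 0 "" ++ "~" ++ PySem.List.pyGetD ((m :: rest).take 6) (-1) "",
        (m :: rest).take 6)])
    rw [pv_pyRange6, List.foldl_map] at this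
    rw [this]
    simp [pvHalves]

-- ===== VERDICT (by name: the statement is the Claim_ definition above) =====
theorem factor_slice_definitions_py_spec : Claim_equal_factor_slice_definitions_py := by
  intro months _
  unfold Spec_factor_slice_definitions_py factor_slice_definitions_py factor_slice_definitions_py_alt
  simp only [pv_byYear_keys, pv_byYear_getD, PySem.List.foldl_append_singleton_eq_map,
    List.nil_append, pv_half_fold]
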